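-- pv_equiv track=rewrite | github.com/dodofaf/olymp | 2020-1/multiply.py | cntseg
-- ===== SOURCE A (Python) =====
-- def cntseg(dil, x, y, s):
-- 	cn = 0
-- 	c = 1
--
-- 	for i in range(x, y):
-- 		mx = dil[i][:]
-- 		mn = dil[i][:]
-- 		for j in range(i+1,y+1):
-- 			m = 0
-- 			for q in range(10):
-- 				if mx[q]<dil[j][q]:
-- 					mx[q] = dil[j][q]
-- 				elif mn[q]>dil[j][q]:
-- 					mn[q] = dil[j][q]
-- 				if mn[q]*s<mx[q]:
-- 					m = 1
-- 					break
-- 			if m == 0: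
-- 				c += 1
-- 			else:
-- 				break
-- 		cn += c
-- 		c = 1
-- 	return cn+1
-- ===== SOURCE B (Python) =====
-- def cntseg(dil, x, y, s):
--     # Coordinate-major rescan: for each start i keep a shrinking bound = first
--     # index whose window violates some coordinate; each of the 10 coordinates is
--     # scanned independently with scalar running min/max up to the current bound.
--     total = 1
--     for i in range(x, y):
--         bound = y + 1
--         for q in range(10):
--             lo = dil[i][q]
--             hi = lo
--             j = i + 1
--             while j < bound:
--                 v = dil[j][q]
--                 if v < lo:
--                     lo = v
--                 elif hi < v:
--                     hi = v
--                 if lo * s < hi: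
--                     bound = j
--                     break
--                 j += 1
--         total += bound - i
--     return total
-- ===== Notes on version B (the rewrite author's own statement) =====
-- stated objective: alternative
-- what changed: Replaces A's row-major scan (vector running min/max per start, coordinate loop innermost with a double break) by a coordinate-major rescan: for each start, each of the 10 coordinates is scanned independently with scalar running min/max up to a shrinking first-violation bound, and the per-start count is the final bound minus the start.
-- outside the precondition, e.g. on cntseg([[0, 5], [1]], 0, 1, 0): A returns 2, B raises IndexError
import Mathlib
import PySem

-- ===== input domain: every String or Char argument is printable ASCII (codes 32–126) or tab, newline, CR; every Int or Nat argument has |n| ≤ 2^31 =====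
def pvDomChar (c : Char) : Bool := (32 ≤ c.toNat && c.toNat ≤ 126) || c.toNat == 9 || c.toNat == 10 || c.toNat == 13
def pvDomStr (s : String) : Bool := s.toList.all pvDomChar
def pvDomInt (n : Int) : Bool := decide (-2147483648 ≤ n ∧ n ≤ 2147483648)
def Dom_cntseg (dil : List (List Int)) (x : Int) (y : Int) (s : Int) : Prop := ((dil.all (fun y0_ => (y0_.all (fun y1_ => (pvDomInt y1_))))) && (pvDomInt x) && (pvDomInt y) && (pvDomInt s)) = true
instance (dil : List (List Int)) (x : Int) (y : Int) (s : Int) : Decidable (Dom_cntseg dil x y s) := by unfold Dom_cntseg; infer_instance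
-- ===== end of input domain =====

-- B replaces A's row-major vector min/max scan by an independent per-coordinate
-- scalar rescan with a shrinking first-violation bound (alternative algorithm,
-- same worst-case cost); equivalence of the two is proved on Pre_cntseg.

-- ===== PORT A =====
-- inner 'for q in range(10)' loop with its break: state (mx, mn), returns (mx, mn, m)
def cntsegQ (s : Int) (row : List Int) : List Nat → List Int → List Int → List Int × List Int × Bool
  | [], mx, mn => (mx, mn, false)
  | q :: rest, mx, mn =>
    let v := PySem.List.pyGetD row (q : Int) 0
    let mx' := if PySem.List.pyGetD mx (q : Int) 0 < v then PySem.List.pySetD mx (q : Int) v else mx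
    let mn' := if PySem.List.pyGetD mx (q : Int) 0 < v then mn
               else if v < PySem.List.pyGetD mn (q : Int) 0 then PySem.List.pySetD mn (q : Int) v else mn
    if PySem.List.pyGetD mn' (q : Int) 0 * s < PySem.List.pyGetD mx' (q : Int) 0 then (mx', mn', true)
    else cntsegQ s row rest mx' mn'

-- inner 'for j in range(i+1, y+1)' loop with its break: state (mx, mn, c), returns c
def cntsegJ (dil : List (List Int)) (s : Int) : List Int → List Int → List Int → Int → Int
  | [], _, _, c => c
  | j :: rest, mx, mn, c =>
    let r := cntsegQ s (PySem.List.pyGetD dil j []) (List.range 10) mx mn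
    if r.2.2 then c else cntsegJ dil s rest r.1 r.2.1 (c + 1)

def cntseg (dil : List (List Int)) (x : Int) (y : Int) (s : Int) : Int :=
  (PySem.List.pyRange x y 1).foldl
    (fun cn i =>
      cn + cntsegJ dil s (PySem.List.pyRange (i + 1) (y + 1) 1)
             (PySem.List.pyGetD dil i []) (PySem.List.pyGetD dil i []) 1) 0 + 1

-- ===== PORT B =====
-- the 'while j < bound' scalar scan of one coordinate (fuel = bound - j makes it structural)
def bScan (dil : List (List Int)) (s : Int) (q : Nat) (bound : Int) : Nat → Int → Int → Int → Int
  | 0, _, _, _ => bound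
  | fuel + 1, lo, hi, j =>
    if j < bound then
      let v := PySem.List.pyGetD (PySem.List.pyGetD dil j []) (q : Int) 0
      let lo' := if v < lo then v else lo
      let hi' := if v < lo then hi else if hi < v then v else hi
      if lo' * s < hi' then j
      else bScan dil s q bound fuel lo' hi' (j + 1)
    else bound

def cntseg_alt (dil : List (List Int)) (x : Int) (y : Int) (s : Int) : Int :=
  (PySem.List.pyRange x y 1).foldl
    (fun total i =>
      total +
        (((List.range 10).foldl
            (fun bound q =>
              bScan dil s q bound ((bound - (i + 1)).toNat)
                (PySem.List.pyGetD (PySem.List.pyGetD dil i []) (q : Int) 0)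
                (PySem.List.pyGetD (PySem.List.pyGetD dil i []) (q : Int) 0)
                (i + 1)) (y + 1)) - i)) 1

-- ===== PRECONDITION & SPEC =====
-- Pre_ restricts to the natural domain of the task: a window x ≤ i ≤ y of valid
-- non-negative row indices, every row in the window having the full 10
-- coordinates; outside it A raises IndexError, or returns only by accident of an
-- early break over a short row or of negative-index wraparound.
def Pre_cntseg (dil : List (List Int)) (x : Int) (y : Int) (_s : Int) : Prop :=
  x < y → 0 ≤ x ∧ y < PySem.List.len dil ∧
    ∀ i ∈ PySem.List.pyRange x (y + 1) 1, 10 ≤ (PySem.List.pyGetD dil i []).length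
instance (dil : List (List Int)) (x : Int) (y : Int) (s : Int) : Decidable (Pre_cntseg dil x y s) := by
  unfold Pre_cntseg; infer_instance

def pvWitness_cntseg : List (List Int) × Int × Int × Int :=
  ([[0,0,0,0,0,0,0,0,0,0],[1,2,0,0,0,0,0,0,0,0]], 0, 1, 2)

def Spec_cntseg (dil : List (List Int)) (x : Int) (y : Int) (s : Int) (out : Int) : Prop := out = cntseg_alt dil x y s
instance (dil : List (List Int)) (x : Int) (y : Int) (s : Int) (out : Int) : Decidable (Spec_cntseg dil x y s out) := by unfold Spec_cntseg; infer_instance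

-- ===== CLAIM (what is proved, stated in full; the proofs are below) =====
def Claim_equal_cntseg : Prop := ∀ (dil : List (List Int)) (x : Int) (y : Int) (s : Int), Dom_cntseg dil x y s → Pre_cntseg dil x y s → Spec_cntseg dil x y s (cntseg dil x y s)

-- ===== LEMMAS AND PROOFS =====

-- reference semantics shared by both proofs: per-coordinate running (min, max)
def pvStep (row : List Int) (st : Nat → Int × Int) : Nat → Int × Int :=
  fun q => (min (st q).1 (row.getD q 0), max (st q).2 (row.getD q 0))

def pvBad (s : Int) (st : Nat → Int × Int) : Bool :=
  (List.range 10).any (fun q => (st q).1 * s < (st q).2)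

-- number of consecutive window extensions before the first violation (all coordinates)
def pvRunAll (dil : List (List Int)) (s : Int) : List Int → (Nat → Int × Int) → Nat
  | [], _ => 0
  | j :: rest, st =>
    let st' := pvStep (PySem.List.pyGetD dil j []) st
    if pvBad s st' then 0 else 1 + pvRunAll dil s rest st'

-- the same for a single coordinate q
def pvRunQ (dil : List (List Int)) (s : Int) (q : Nat) : List Int → Int → Int → Nat
  | [], _, _ => 0
  | j :: rest, lo, hi =>
    let lo' := min lo ((PySem.List.pyGetD dil j []).getD q 0)
    let hi' := max hi ((PySem.List.pyGetD dil j []).getD q 0)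
    if lo' * s < hi' then 0 else 1 + pvRunQ dil s q rest lo' hi'

lemma pvAny_congr (l : List Nat) (f g : Nat → Bool) (h : ∀ a ∈ l, f a = g a) :
    l.any f = l.any g := by
  induction l with
  | nil => rfl
  | cons a t ih => simp only [List.any_cons, h a (by simp), ih (fun b hb => h b (by simp [hb]))]

lemma pvRunAll_congr (dil : List (List Int)) (s : Int) (L : List Int) :
    ∀ st1 st2 : Nat → Int × Int, (∀ q < 10, st1 q = st2 q) →
    pvRunAll dil s L st1 = pvRunAll dil s L st2 := by
  induction L with
  | nil => intro _ _ _; rfl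
  | cons j rest ih =>
    intro st1 st2 h
    have hst : ∀ q < 10, pvStep (PySem.List.pyGetD dil j []) st1 q = pvStep (PySem.List.pyGetD dil j []) st2 q := by
      intro q hq; simp [pvStep, h q hq]
    have hb : pvBad s (pvStep (PySem.List.pyGetD dil j []) st1)
        = pvBad s (pvStep (PySem.List.pyGetD dil j []) st2) := by
      unfold pvBad
      exact pvAny_congr _ _ _ (fun q hq => by rw [hst q (List.mem_range.mp hq)])
    simp only [pvRunAll]
    rw [hb]
    cases hB : pvBad s (pvStep (PySem.List.pyGetD dil j []) st2) <;>
      simp [ih _ _ hst]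


lemma pvRunAll_le_length (dil : List (List Int)) (s : Int) (L : List Int) :
    ∀ st, pvRunAll dil s L st ≤ L.length := by
  induction L with
  | nil => intro _; simp [pvRunAll]
  | cons j rest ih =>
    intro st
    simp only [pvRunAll, List.length_cons]
    split
    · omega
    · have := ih (pvStep (PySem.List.pyGetD dil j []) st); omega


lemma pvRunAll_le_pvRunQ (dil : List (List Int)) (s : Int) (L : List Int) :
    ∀ (st : Nat → Int × Int) (q : Nat), q < 10 →
    pvRunAll dil s L st ≤ pvRunQ dil s q L (st q).1 (st q).2 := by
  induction L with
  | nil => intro _ _ _; simp [pvRunAll, pvRunQ]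
  | cons j rest ih =>
    intro st q hq
    simp only [pvRunAll, pvRunQ]
    cases hB : pvBad s (pvStep (PySem.List.pyGetD dil j []) st) with
    | true => simp
    | false =>
      have hnb : ¬ ((pvStep (PySem.List.pyGetD dil j []) st q).1 * s
          < (pvStep (PySem.List.pyGetD dil j []) st q).2) := by
        have := List.any_eq_false.mp hB q (List.mem_range.mpr hq)
        simpa using this
      have hnb' : ¬ (min (st q).1 ((PySem.List.pyGetD dil j []).getD q 0) * s
          < max (st q).2 ((PySem.List.pyGetD dil j []).getD q 0)) := hnb
      simp only [hnb', Bool.false_eq_true, if_false]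
      have := ih (pvStep (PySem.List.pyGetD dil j []) st) q hq
      simp only [pvStep] at this
      omega


lemma pvRunAll_ex (dil : List (List Int)) (s : Int) (L : List Int) :
    ∀ st : Nat → Int × Int, pvRunAll dil s L st < L.length →
    ∃ q < 10, pvRunQ dil s q L (st q).1 (st q).2 = pvRunAll dil s L st := by
  induction L with
  | nil => intro st h; simp at h
  | cons j rest ih =>
    intro st h
    simp only [pvRunAll] at h ⊢
    cases hB : pvBad s (pvStep (PySem.List.pyGetD dil j []) st) with
    | true =>
      obtain ⟨q, hqmem, hqc⟩ := List.any_eq_true.mp hB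
      refine ⟨q, List.mem_range.mp hqmem, ?_⟩
      have hqc' : min (st q).1 ((PySem.List.pyGetD dil j []).getD q 0) * s
          < max (st q).2 ((PySem.List.pyGetD dil j []).getD q 0) := by simpa [pvStep] using hqc
      simp [pvRunQ]
      simp only [List.getD] at hqc'
      omega
    | false =>
      rw [hB] at h
      simp only [if_false, List.length_cons, Bool.false_eq_true] at h
      have hlt : pvRunAll dil s rest (pvStep (PySem.List.pyGetD dil j []) st) < rest.length := by omega
      obtain ⟨q, hq10, hqe⟩ := ih (pvStep (PySem.List.pyGetD dil j []) st) hlt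
      refine ⟨q, hq10, ?_⟩
      have hnb : ¬ ((pvStep (PySem.List.pyGetD dil j []) st q).1 * s
          < (pvStep (PySem.List.pyGetD dil j []) st q).2) := by
        have := List.any_eq_false.mp hB q (List.mem_range.mpr hq10)
        simpa using this
      have hnb' : ¬ (min (st q).1 ((PySem.List.pyGetD dil j []).getD q 0) * s
          < max (st q).2 ((PySem.List.pyGetD dil j []).getD q 0)) := hnb
      simp only [pvRunQ, if_neg hnb', Bool.false_eq_true, if_false]
      simp only [pvStep] at hqe
      omega


lemma cntsegQ_char (s : Int) (row : List Int) :
    ∀ (qs : List Nat) (mx mn : List Int), qs.Nodup → (∀ q ∈ qs, q < 10) →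
    10 ≤ mx.length → 10 ≤ mn.length → (∀ q ∈ qs, mn.getD q 0 ≤ mx.getD q 0) →
    ((cntsegQ s row qs mx mn).2.2
        = qs.any (fun q => min (mn.getD q 0) (row.getD q 0) * s < max (mx.getD q 0) (row.getD q 0))) ∧
    ((cntsegQ s row qs mx mn).2.2 = false →
      (cntsegQ s row qs mx mn).1.length = mx.length ∧
      (cntsegQ s row qs mx mn).2.1.length = mn.length ∧
      (∀ idx : Nat, (cntsegQ s row qs mx mn).1.getD idx 0
          = if idx ∈ qs then max (mx.getD idx 0) (row.getD idx 0) else mx.getD idx 0) ∧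
      (∀ idx : Nat, (cntsegQ s row qs mx mn).2.1.getD idx 0
          = if idx ∈ qs then min (mn.getD idx 0) (row.getD idx 0) else mn.getD idx 0)) := by
  intro qs
  induction qs with
  | nil =>
    intro mx mn _ _ _ _ _
    exact ⟨rfl, fun _ => ⟨rfl, rfl, fun idx => by simp [cntsegQ], fun idx => by simp [cntsegQ]⟩⟩
  | cons q rest ih =>
    intro mx mn hnd hq hmx hmn hle
    have hq10 : q < 10 := hq q (by simp)
    have hqmx : q < mx.length := by omega
    have hqmn : q < mn.length := by omega
    have hlq : mn.getD q 0 ≤ mx.getD q 0 := hle q (by simp)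
    have hqrest : q ∉ rest := (List.nodup_cons.mp hnd).1
    have hmxq : ((if mx.getD q 0 < row.getD q 0 then mx.set q (row.getD q 0) else mx)).getD q 0 = max (mx.getD q 0) (row.getD q 0) := by
      split_ifs with h1
      · simp only [List.getD, List.getElem?_set_self hqmx, Option.getD_some]
        simp only [List.getD] at *; omega
      · omega
    have hmnq : ((if mx.getD q 0 < row.getD q 0 then mn else if row.getD q 0 < mn.getD q 0 then mn.set q (row.getD q 0) else mn)).getD q 0 = min (mn.getD q 0) (row.getD q 0) := by
      split_ifs with h1 h2
      · omega
      · simp only [List.getD, List.getElem?_set_self hqmn, Option.getD_some]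
        simp only [List.getD] at *; omega
      · omega
    have hmxo : ∀ idx : Nat, idx ≠ q → ((if mx.getD q 0 < row.getD q 0 then mx.set q (row.getD q 0) else mx)).getD idx 0 = mx.getD idx 0 := by
      intro idx hne; split_ifs with h1
      · simp [List.getD, List.getElem?_set_ne (Ne.symm hne)]
      · rfl
    have hmno : ∀ idx : Nat, idx ≠ q → ((if mx.getD q 0 < row.getD q 0 then mn else if row.getD q 0 < mn.getD q 0 then mn.set q (row.getD q 0) else mn)).getD idx 0 = mn.getD idx 0 := by
      intro idx hne; split_ifs with h1 h2
      · rfl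
      · simp [List.getD, List.getElem?_set_ne (Ne.symm hne)]
      · rfl
    have hlmx : ((if mx.getD q 0 < row.getD q 0 then mx.set q (row.getD q 0) else mx)).length = mx.length := by split_ifs <;> simp
    have hlmn : ((if mx.getD q 0 < row.getD q 0 then mn else if row.getD q 0 < mn.getD q 0 then mn.set q (row.getD q 0) else mn)).length = mn.length := by split_ifs <;> simp
    have key : cntsegQ s row (q :: rest) mx mn
        = (if min (mn.getD q 0) (row.getD q 0) * s < max (mx.getD q 0) (row.getD q 0)
           then ((if mx.getD q 0 < row.getD q 0 then mx.set q (row.getD q 0) else mx), (if mx.getD q 0 < row.getD q 0 then mn else if row.getD q 0 < mn.getD q 0 then mn.set q (row.getD q 0) else mn), true)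
           else cntsegQ s row rest (if mx.getD q 0 < row.getD q 0 then mx.set q (row.getD q 0) else mx) (if mx.getD q 0 < row.getD q 0 then mn else if row.getD q 0 < mn.getD q 0 then mn.set q (row.getD q 0) else mn)) := by
      simp only [cntsegQ, PySem.List.pyGetD_natCast, PySem.List.pySetD_natCast]
      rw [hmnq, hmxq]
    by_cases hC : min (mn.getD q 0) (row.getD q 0) * s < max (mx.getD q 0) (row.getD q 0)
    · rw [key, if_pos hC]
      refine ⟨?_, fun habs => by simp at habs⟩
      simp only [List.any_cons, decide_eq_true hC, Bool.true_or]
    · rw [key, if_neg hC]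
      have hle' : ∀ q' ∈ rest, ((if mx.getD q 0 < row.getD q 0 then mn else if row.getD q 0 < mn.getD q 0 then mn.set q (row.getD q 0) else mn)).getD q' 0 ≤ ((if mx.getD q 0 < row.getD q 0 then mx.set q (row.getD q 0) else mx)).getD q' 0 := by
        intro q' hq'
        have hne : q' ≠ q := fun h => hqrest (h ▸ hq')
        rw [hmno q' hne, hmxo q' hne]
        exact hle q' (by simp [hq'])
      obtain ⟨ihA, ihB⟩ := ih (if mx.getD q 0 < row.getD q 0 then mx.set q (row.getD q 0) else mx) (if mx.getD q 0 < row.getD q 0 then mn else if row.getD q 0 < mn.getD q 0 then mn.set q (row.getD q 0) else mn) (List.nodup_cons.mp hnd).2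
        (fun q' hq' => hq q' (by simp [hq'])) (by omega) (by omega) hle'
      constructor
      · rw [ihA, List.any_cons, decide_eq_false hC, Bool.false_or]
        exact pvAny_congr _ _ _ (fun a ha => by
          have hne : a ≠ q := fun h => hqrest (h ▸ ha)
          rw [hmno a hne, hmxo a hne])
      · intro hfalse
        obtain ⟨l1, l2, g1, g2⟩ := ihB hfalse
        refine ⟨by rw [l1, hlmx], by rw [l2, hlmn], ?_, ?_⟩
        · intro idx
          rw [g1 idx]
          by_cases hiq : idx = q
          · subst hiq
            rw [if_neg hqrest, hmxq, if_pos (by simp)]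
          · by_cases hir : idx ∈ rest
            · rw [if_pos hir, hmxo idx hiq, if_pos (by simp [hir])]
            · rw [if_neg hir, hmxo idx hiq, if_neg (by simp [hiq, hir])]
        · intro idx
          rw [g2 idx]
          by_cases hiq : idx = q
          · subst hiq
            rw [if_neg hqrest, hmnq, if_pos (by simp)]
          · by_cases hir : idx ∈ rest
            · rw [if_pos hir, hmno idx hiq, if_pos (by simp [hir])]
            · rw [if_neg hir, hmno idx hiq, if_neg (by simp [hiq, hir])]


lemma cntsegJ_char (dil : List (List Int)) (s : Int) (L : List Int) :
    ∀ (mx mn : List Int) (c : Int), 10 ≤ mx.length → 10 ≤ mn.length →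
    (∀ q < 10, mn.getD q 0 ≤ mx.getD q 0) →
    cntsegJ dil s L mx mn c
      = c + (pvRunAll dil s L (fun q => (mn.getD q 0, mx.getD q 0)) : Int) := by
  induction L with
  | nil => intro mx mn c _ _ _; simp [cntsegJ, pvRunAll]
  | cons j rest ih =>
    intro mx mn c hmx hmn hle
    obtain ⟨chA, chB⟩ := cntsegQ_char s (PySem.List.pyGetD dil j []) (List.range 10) mx mn
      List.nodup_range (fun q hq => List.mem_range.mp hq) hmx hmn
      (fun q hq => hle q (List.mem_range.mp hq))
    have hbad : (cntsegQ s (PySem.List.pyGetD dil j []) (List.range 10) mx mn).2.2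
        = pvBad s (pvStep (PySem.List.pyGetD dil j []) (fun q => (mn.getD q 0, mx.getD q 0))) := by
      rw [chA]; rfl
    simp only [cntsegJ]
    cases hB : pvBad s (pvStep (PySem.List.pyGetD dil j []) (fun q => (mn.getD q 0, mx.getD q 0))) with
    | true =>
      rw [hbad, hB]
      simp only [pvRunAll, hB]
      simp
    | false =>
      rw [hbad, hB]
      simp only [Bool.false_eq_true, if_false]
      obtain ⟨l1, l2, g1, g2⟩ := chB (hbad.trans hB)
      rw [ih _ _ (c + 1) (by rw [l1]; exact hmx) (by rw [l2]; exact hmn) (fun q hq => by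
        rw [g1 q, g2 q, if_pos (List.mem_range.mpr hq), if_pos (List.mem_range.mpr hq)]
        have := hle q hq
        omega)]
      rw [pvRunAll_congr dil s rest _ (pvStep (PySem.List.pyGetD dil j [])
            (fun q => (mn.getD q 0, mx.getD q 0))) (fun q hq => by
        rw [g1 q, g2 q, if_pos (List.mem_range.mpr hq), if_pos (List.mem_range.mpr hq)]
        rfl)]
      simp only [pvRunAll, hB, Bool.false_eq_true, if_false]
      push_cast
      ring


lemma bScan_char (dil : List (List Int)) (s : Int) (q : Nat) (Y : Int) :
    ∀ (fuel : Nat) (b j lo hi : Int), j ≤ b → b ≤ Y + 1 → fuel = (b - j).toNat → lo ≤ hi →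
    bScan dil s q b fuel lo hi j
      = min b (j + (pvRunQ dil s q (PySem.List.pyRange j (Y + 1) 1) lo hi : Int)) := by
  intro fuel
  induction fuel with
  | zero =>
    intro b j lo hi hjb hbY hf _
    have hbj : b = j := by omega
    subst hbj
    have h0 : (0:Int) ≤ (pvRunQ dil s q (PySem.List.pyRange b (Y + 1) 1) lo hi : Int) :=
      Int.natCast_nonneg _
    simp only [bScan]
    omega
  | succ n ih =>
    intro b j lo hi hjb hbY hf hlh
    have hjb' : j < b := by omega
    have hjY : j < Y + 1 := by omega
    rw [PySem.List.pyRange_one_cons hjY]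
    simp only [bScan, if_pos hjb', PySem.List.pyGetD_natCast]
    have hlo : (if (PySem.List.pyGetD dil j []).getD q 0 < lo then (PySem.List.pyGetD dil j []).getD q 0 else lo)
        = min lo ((PySem.List.pyGetD dil j []).getD q 0) := by split_ifs <;> omega
    have hhi : (if (PySem.List.pyGetD dil j []).getD q 0 < lo then hi
          else if hi < (PySem.List.pyGetD dil j []).getD q 0 then (PySem.List.pyGetD dil j []).getD q 0 else hi)
        = max hi ((PySem.List.pyGetD dil j []).getD q 0) := by split_ifs <;> omega
    rw [hlo, hhi]
    simp only [pvRunQ]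
    by_cases hC : min lo ((PySem.List.pyGetD dil j []).getD q 0) * s
        < max hi ((PySem.List.pyGetD dil j []).getD q 0)
    · rw [if_pos hC, if_pos hC]
      simp only [Nat.cast_zero]
      omega
    · rw [if_neg hC, if_neg hC]
      rw [ih b (j + 1) _ _ (by omega) hbY (by omega) (by omega)]
      push_cast
      omega


lemma foldl_min_char (g : Nat → Int) :
    ∀ (qs : List Nat) (b : Int),
      ((qs.foldl (fun b q => min b (g q)) b = b ∨ ∃ q ∈ qs, qs.foldl (fun b q => min b (g q)) b = g q) ∧
       qs.foldl (fun b q => min b (g q)) b ≤ b ∧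
       ∀ q ∈ qs, qs.foldl (fun b q => min b (g q)) b ≤ g q) := by
  intro qs
  induction qs with
  | nil => intro b; exact ⟨Or.inl rfl, le_refl b, fun q hq => absurd hq (by simp)⟩
  | cons q rest ih =>
    intro b
    obtain ⟨hor, hle, hall⟩ := ih (min b (g q))
    simp only [List.foldl_cons]
    refine ⟨?_, hle.trans (min_le_left _ _), ?_⟩
    · rcases hor with h | ⟨q', hq', he⟩
      · rw [h]
        rcases min_cases b (g q) with ⟨he2, _⟩ | ⟨he2, _⟩
        · exact Or.inl he2
        · exact Or.inr ⟨q, by simp, he2⟩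
      · exact Or.inr ⟨q', by simp [hq'], he⟩
    · intro q' hq'
      rcases List.mem_cons.mp hq' with h | h
      · subst h; exact hle.trans (min_le_right _ _)
      · exact hall q' h


lemma qfold_eq_foldl_min (dil : List (List Int)) (s : Int) (i Y : Int) :
    ∀ (qs : List Nat) (b : Int), i + 1 ≤ b → b ≤ Y + 1 →
    qs.foldl
      (fun bound q =>
        bScan dil s q bound ((bound - (i + 1)).toNat)
          (PySem.List.pyGetD (PySem.List.pyGetD dil i []) (q : Int) 0)
          (PySem.List.pyGetD (PySem.List.pyGetD dil i []) (q : Int) 0)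
          (i + 1)) b
    = qs.foldl
        (fun bound q =>
          min bound ((i + 1) +
            (pvRunQ dil s q (PySem.List.pyRange (i + 1) (Y + 1) 1)
              ((PySem.List.pyGetD dil i []).getD q 0) ((PySem.List.pyGetD dil i []).getD q 0) : Int))) b := by
  intro qs
  induction qs with
  | nil => intro b _ _; rfl
  | cons q rest ih =>
    intro b hb1 hb2
    simp only [List.foldl_cons]
    rw [PySem.List.pyGetD_natCast]
    rw [bScan_char dil s q Y ((b - (i + 1)).toNat) b (i + 1) _ _ (by omega) hb2 rfl (le_refl _)]
    have h0 : (0:Int) ≤ (pvRunQ dil s q (PySem.List.pyRange (i + 1) (Y + 1) 1)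
        ((PySem.List.pyGetD dil i []).getD q 0) ((PySem.List.pyGetD dil i []).getD q 0) : Int) :=
      Int.natCast_nonneg _
    exact ih _ (by omega) (by omega)


lemma perStart (dil : List (List Int)) (s : Int) (y i : Int)
    (hy : i < y) (hrow : 10 ≤ (PySem.List.pyGetD dil i []).length) :
    cntsegJ dil s (PySem.List.pyRange (i + 1) (y + 1) 1)
        (PySem.List.pyGetD dil i []) (PySem.List.pyGetD dil i []) 1
      = ((List.range 10).foldl
          (fun bound q =>
            bScan dil s q bound ((bound - (i + 1)).toNat)
              (PySem.List.pyGetD (PySem.List.pyGetD dil i []) (q : Int) 0)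
              (PySem.List.pyGetD (PySem.List.pyGetD dil i []) (q : Int) 0)
              (i + 1)) (y + 1)) - i := by
  rw [cntsegJ_char dil s _ _ _ 1 hrow hrow (fun _ _ => le_refl _)]
  rw [qfold_eq_foldl_min dil s i y (List.range 10) (y + 1) (by omega) (le_refl _)]
  obtain ⟨hor, hub, hall⟩ := foldl_min_char
    (fun q => (i + 1) + (pvRunQ dil s q (PySem.List.pyRange (i + 1) (y + 1) 1)
      ((PySem.List.pyGetD dil i []).getD q 0) ((PySem.List.pyGetD dil i []).getD q 0) : Int))
    (List.range 10) (y + 1)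
  have hlen : (PySem.List.pyRange (i + 1) (y + 1) 1).length = (y - i).toNat := by
    rw [PySem.List.length_pyRange_one]; congr 1; ring
  have hRlen : pvRunAll dil s (PySem.List.pyRange (i + 1) (y + 1) 1)
      (fun q => ((PySem.List.pyGetD dil i []).getD q 0, (PySem.List.pyGetD dil i []).getD q 0))
      ≤ (y - i).toNat := by
    rw [← hlen]; exact pvRunAll_le_length dil s _ _
  have hyi : ((y - i).toNat : Int) = y - i := Int.toNat_of_nonneg (by omega)
  have hupper : (List.range 10).foldl (fun bound q =>
        min bound ((i + 1) + (pvRunQ dil s q (PySem.List.pyRange (i + 1) (y + 1) 1)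
          ((PySem.List.pyGetD dil i []).getD q 0) ((PySem.List.pyGetD dil i []).getD q 0) : Int))) (y + 1)
      ≤ (i + 1) + (pvRunAll dil s (PySem.List.pyRange (i + 1) (y + 1) 1)
          (fun q => ((PySem.List.pyGetD dil i []).getD q 0, (PySem.List.pyGetD dil i []).getD q 0)) : Int) := by
    by_cases hRfull : pvRunAll dil s (PySem.List.pyRange (i + 1) (y + 1) 1)
        (fun q => ((PySem.List.pyGetD dil i []).getD q 0, (PySem.List.pyGetD dil i []).getD q 0))
        < (PySem.List.pyRange (i + 1) (y + 1) 1).length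
    · obtain ⟨q, hq10, hqe⟩ := pvRunAll_ex dil s _ _ hRfull
      have := hall q (List.mem_range.mpr hq10)
      rw [hqe] at this
      exact this
    · rw [hlen] at hRfull
      omega
  have hlower : (i + 1) + (pvRunAll dil s (PySem.List.pyRange (i + 1) (y + 1) 1)
          (fun q => ((PySem.List.pyGetD dil i []).getD q 0, (PySem.List.pyGetD dil i []).getD q 0)) : Int)
      ≤ (List.range 10).foldl (fun bound q =>
        min bound ((i + 1) + (pvRunQ dil s q (PySem.List.pyRange (i + 1) (y + 1) 1)
          ((PySem.List.pyGetD dil i []).getD q 0) ((PySem.List.pyGetD dil i []).getD q 0) : Int))) (y + 1) := by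
    rcases hor with h | ⟨q, hq, he⟩
    · rw [h]; omega
    · rw [he]
      have := pvRunAll_le_pvRunQ dil s (PySem.List.pyRange (i + 1) (y + 1) 1)
        (fun q => ((PySem.List.pyGetD dil i []).getD q 0, (PySem.List.pyGetD dil i []).getD q 0))
        q (List.mem_range.mp hq)
      simp only at this
      omega
  omega


-- ===== VERDICT (by name: the statement is the Claim_ definition above) =====
theorem cntseg_spec : Claim_equal_cntseg := by
  intro dil x y s hdom hpre
  unfold Spec_cntseg cntseg cntseg_alt
  by_cases hxy : x < y
  · obtain ⟨hx0, hylen, hrows⟩ := hpre hxy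
    rw [PySem.List.foldl_add, PySem.List.foldl_add]
    have hmap : (PySem.List.pyRange x y 1).map (fun i =>
          cntsegJ dil s (PySem.List.pyRange (i + 1) (y + 1) 1)
            (PySem.List.pyGetD dil i []) (PySem.List.pyGetD dil i []) 1)
        = (PySem.List.pyRange x y 1).map (fun i =>
            ((List.range 10).foldl (fun bound q =>
              bScan dil s q bound ((bound - (i + 1)).toNat)
                (PySem.List.pyGetD (PySem.List.pyGetD dil i []) (q : Int) 0)
                (PySem.List.pyGetD (PySem.List.pyGetD dil i []) (q : Int) 0)
                (i + 1)) (y + 1)) - i) := by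
      apply List.map_congr_left
      intro i hi
      obtain ⟨hxi, hiy⟩ := PySem.List.mem_pyRange_one.mp hi
      exact perStart dil s y i hiy
        (hrows i (PySem.List.mem_pyRange_one.mpr ⟨hxi, by omega⟩))
    rw [hmap]
    ring
  · rw [PySem.List.pyRange_one_eq_nil (by omega)]
    simp
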